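-- pv_equiv track=rewrite | github.com/arnavbee/grada | apps/api/app/services/marketplace_document_templates.py | _extract_headers_from_row
-- ===== SOURCE A (Python) =====
-- def _extract_headers_from_row(row: list[str]) -> list[str]:
--     headers: list[str] = []
--     seen_non_empty = False
--     for value in row:
--         cleaned = value.strip()
--         if cleaned:
--             seen_non_empty = True
--             headers.append(cleaned)
--             continue
--         if seen_non_empty:
--             break
--     return headers
-- ===== SOURCE B (Python) =====
-- def _extract_headers_from_row(row: list[str]) -> list[str]:
--     flags = [bool(cell.strip()) for cell in row]
--     if True not in flags:
--         return []
--     start = flags.index(True)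
--     tail = flags[start:]
--     stop = start + (tail.index(False) if False in tail else len(tail))
--     return [cell.strip() for cell in row[start:stop]]
-- ===== Notes on version B (the rewrite author's own statement) =====
-- stated objective: alternative
-- what changed: B computes boundary indices (first non-empty cell via list.index on a boolean flags list, then the first empty flag after it) and returns a single stripped slice row[start:stop], instead of A's element-by-element loop with a seen_non_empty flag, append and break.
import Mathlib
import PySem

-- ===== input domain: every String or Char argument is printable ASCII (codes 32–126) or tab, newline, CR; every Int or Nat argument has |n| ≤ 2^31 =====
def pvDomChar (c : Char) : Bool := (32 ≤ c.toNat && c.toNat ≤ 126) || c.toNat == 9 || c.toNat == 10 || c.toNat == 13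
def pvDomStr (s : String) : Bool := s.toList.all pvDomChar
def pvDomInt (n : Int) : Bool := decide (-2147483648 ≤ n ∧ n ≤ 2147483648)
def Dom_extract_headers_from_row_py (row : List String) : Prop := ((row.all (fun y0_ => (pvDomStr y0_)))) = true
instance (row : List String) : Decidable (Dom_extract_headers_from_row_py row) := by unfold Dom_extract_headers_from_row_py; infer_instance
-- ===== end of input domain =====

-- B replaces A's seen_non_empty flag loop with boundary-index computation (list.index on a flags list) and one slice; alternative decomposition, same cost.
-- ===== PORT A =====
def extractHeadersGoA : List String → Bool → List String
  | [], _ => []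
  | value :: rest, seen =>
      let cleaned := PySem.Str.strip value
      if cleaned ≠ "" then cleaned :: extractHeadersGoA rest true
      else if seen then [] else extractHeadersGoA rest seen

def extract_headers_from_row_py (row : List String) : List String :=
  extractHeadersGoA row false

-- ===== PORT B =====
def extract_headers_from_row_py_alt (row : List String) : List String :=
  let flags : List Bool := row.map (fun cell => PySem.Str.strip cell != "")
  if true ∈ flags then
    match PySem.List.index? flags true with
    | some start =>
        let tail := PySem.List.slice flags (some (start : Int)) none
        let stop := start + (if false ∈ tail then (PySem.List.index? tail false).getD tail.length else tail.length)
        (PySem.List.slice row (some (start : Int)) (some (stop : Int))).map PySem.Str.strip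
    | none => []   -- unreachable: guarded by the membership test above
  else []

-- ===== PRECONDITION & SPEC =====
def Spec_extract_headers_from_row_py (row : List String) (out : List String) : Prop := out = extract_headers_from_row_py_alt row
instance (row : List String) (out : List String) : Decidable (Spec_extract_headers_from_row_py row out) := by unfold Spec_extract_headers_from_row_py; infer_instance

-- ===== CLAIM =====
def Claim_equal_extract_headers_from_row_py : Prop := ∀ (row : List String), Dom_extract_headers_from_row_py row → Spec_extract_headers_from_row_py row (extract_headers_from_row_py row)

-- ===== LEMMAS AND PROOFS =====

lemma take_length_takeWhile {α : Type} (p : α → Bool) (l : List α) :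
    l.take (l.takeWhile p).length = l.takeWhile p := by
  induction l with
  | nil => rfl
  | cons a l ih =>
      by_cases h : p a
      · simp [h, ih]
      · simp [h]

lemma getD_index?_false (l : List Bool) :
    (PySem.List.index? l false).getD l.length = (l.takeWhile id).length := by
  induction l with
  | nil => rfl
  | cons b l ih =>
      cases b
      · rw [PySem.List.index?_cons_self false l]; simp
      · rw [PySem.List.index?_cons_of_ne l (by decide : (true : Bool) ≠ false)]
        cases h : PySem.List.index? l false with
        | none => rw [h] at ih; simp at ih; simp [ih]
        | some j => rw [h] at ih; simp at ih; simp [ih]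

lemma if_mem_getD (tail : List Bool) :
    (if false ∈ tail then (PySem.List.index? tail false).getD tail.length else tail.length)
      = (PySem.List.index? tail false).getD tail.length := by
  by_cases h : false ∈ tail
  · simp [h]
  · have hn : PySem.List.index? tail false = none := (PySem.List.index?_eq_none_iff tail false).mpr h
    rw [if_neg h, hn]; rfl

lemma extractHeadersGoA_true (xs : List String) :
    extractHeadersGoA xs true
      = (xs.takeWhile (fun c => PySem.Str.strip c != "")).map PySem.Str.strip := by
  induction xs with
  | nil => rfl
  | cons v rest ih =>
      simp only [extractHeadersGoA, List.takeWhile_cons]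
      by_cases h : PySem.Str.strip v = ""
      · simp [h]
      · simp [h, ih]

lemma alt_cons_empty (v : String) (rest : List String) (h : PySem.Str.strip v = "") :
    extract_headers_from_row_py_alt (v :: rest) = extract_headers_from_row_py_alt rest := by
  have hfv : (PySem.Str.strip v != "") = false := by simp [h]
  unfold extract_headers_from_row_py_alt
  simp only [List.map_cons, hfv]
  set fr := rest.map (fun cell => PySem.Str.strip cell != "") with hfr
  by_cases hm : true ∈ fr
  · obtain ⟨k, hk⟩ := Option.isSome_iff_exists.mp ((PySem.List.index?_isSome_iff fr true).mpr hm)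
    have hcons : PySem.List.index? ((false : Bool) :: fr) true = some (k + 1) := by
      rw [PySem.List.index?_cons_of_ne fr (by decide : (false : Bool) ≠ true), hk]; rfl
    simp only [List.mem_cons, hm, or_true, if_true, hcons, hk,
      PySem.List.slice_from_natCast, List.drop_succ_cons]
    rw [PySem.List.slice_natCast, PySem.List.slice_natCast]
    simp [List.drop_succ_cons]
  · have hm' : true ∉ (false : Bool) :: fr := by simp [hm]
    simp [hm, hm']

lemma alt_cons_nonempty (v : String) (rest : List String) (h : PySem.Str.strip v ≠ "") :
    extract_headers_from_row_py_alt (v :: rest)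
      = ((v :: rest).takeWhile (fun c => PySem.Str.strip c != "")).map PySem.Str.strip := by
  have hfv : (PySem.Str.strip v != "") = true := by simp [h]
  unfold extract_headers_from_row_py_alt
  simp only [List.map_cons, hfv]
  set fr := rest.map (fun cell => PySem.Str.strip cell != "") with hfr
  have hmem : true ∈ (true : Bool) :: fr := List.mem_cons_self
  have hidx : PySem.List.index? ((true : Bool) :: fr) true = some 0 :=
    PySem.List.index?_cons_self true fr
  simp only [hmem, if_true, hidx, PySem.List.slice_from_natCast, List.drop_zero]
  rw [if_mem_getD, getD_index?_false]
  have hlen : (List.takeWhile id ((true : Bool) :: fr)).length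
      = ((v :: rest).takeWhile (fun c => PySem.Str.strip c != "")).length := by
    rw [hfr, List.takeWhile_cons, List.takeWhile_cons, hfv]
    simp [List.takeWhile_map]
  rw [hlen]
  rw [PySem.List.slice_natCast]
  simp [take_length_takeWhile]

lemma goA_false_alt (row : List String) :
    extractHeadersGoA row false = extract_headers_from_row_py_alt row := by
  induction row with
  | nil => rfl
  | cons v rest ih =>
      by_cases h : PySem.Str.strip v = ""
      · have : extractHeadersGoA (v :: rest) false = extractHeadersGoA rest false := by
          simp [extractHeadersGoA, h]
        rw [this, ih, alt_cons_empty v rest h]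
      · rw [alt_cons_nonempty v rest h]
        simp only [extractHeadersGoA, List.takeWhile_cons]
        simp [h, extractHeadersGoA_true]

-- ===== VERDICT =====
theorem extract_headers_from_row_py_spec : Claim_equal_extract_headers_from_row_py := by
  intro row _
  exact goA_false_alt row
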